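-- pv_equiv track=rewrite | github.com/pypi-data/pypi-mirror-377 | packages/pbi-parsers/pbi_parsers-0.9.2.tar.gz/pbi_parsers-0.9.2/pbi_parsers/dax/utils.py | _get_highlighted_text
-- ===== SOURCE A (Python) =====
-- def _get_highlighted_text(
--     lines: list[str],
--     position: tuple[int, int],
-- ) -> dict[int, tuple[int, int]]:
--     highlight_line_dict: dict[int, tuple[int, int]] = {}
--
--     remaining_start, remaining_end = position
--     for i, line in enumerate(lines):
--         if len(line) > remaining_start and remaining_end > 0:
--             buffer = len(str(i)) + 3
--             highlight_line_dict[i] = (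
--                 buffer + remaining_start,
--                 buffer + min(remaining_end, len(line)),
--             )
--         remaining_start -= len(line) + 1  # +1 for the newline character
--         remaining_end -= len(line) + 1
--     return highlight_line_dict
-- ===== SOURCE B (Python) =====
-- def _get_highlighted_text(
--     lines: list[str],
--     position: tuple[int, int],
-- ) -> dict[int, tuple[int, int]]:
--     # Prefix-offset table + interval-overlap comprehension instead of the
--     # running-subtraction accumulator loop.
--     start, end = position
--     offsets = []
--     off = 0
--     for line in lines:
--         offsets.append(off)
--         off += len(line) + 1  # +1 for the newline character
--     return {
--         i: (
--             len(str(i)) + 3 + start - o,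
--             len(str(i)) + 3 + min(end - o, len(line)),
--         )
--         for i, (line, o) in enumerate(zip(lines, offsets))
--         if o < end and o + len(line) > start
--     }
-- ===== Notes on version B (the rewrite author's own statement) =====
-- stated objective: alternative
-- what changed: Replaces the running-subtraction accumulator loop (remaining_start/remaining_end decremented per line while inserting into a dict) with a prefix line-start offset table plus a single dict comprehension selecting lines whose interval overlaps [start, end).
import Mathlib
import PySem

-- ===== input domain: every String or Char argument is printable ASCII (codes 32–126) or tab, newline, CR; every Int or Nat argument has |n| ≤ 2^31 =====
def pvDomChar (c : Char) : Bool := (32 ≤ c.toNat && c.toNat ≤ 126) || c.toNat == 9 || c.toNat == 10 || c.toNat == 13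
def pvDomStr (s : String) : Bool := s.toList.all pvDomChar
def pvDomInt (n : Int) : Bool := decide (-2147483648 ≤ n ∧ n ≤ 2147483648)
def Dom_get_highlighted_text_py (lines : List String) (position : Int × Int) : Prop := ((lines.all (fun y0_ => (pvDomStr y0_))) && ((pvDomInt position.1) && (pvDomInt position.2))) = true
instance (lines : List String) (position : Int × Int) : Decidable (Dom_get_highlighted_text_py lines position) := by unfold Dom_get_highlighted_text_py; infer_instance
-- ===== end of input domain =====

-- B replaces A's running-subtraction accumulator loop with a prefix-offset table
-- plus an interval-overlap comprehension (alternative decomposition, same cost).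

-- ===== PORT A =====
def get_highlighted_text_py (lines : List String) (position : Int × Int) : List (Int × Int × Int) :=
  let final :=
    (PySem.List.enumerate lines).foldl
      (fun (st : PySem.Dict Int (Int × Int) × Int × Int) (p : Int × String) =>
        (if PySem.Str.len p.2 > st.2.1 ∧ st.2.2 > 0 then
            st.1.insert p.1
              (PySem.Str.len (PySem.Int.toStr p.1) + 3 + st.2.1,
               PySem.Str.len (PySem.Int.toStr p.1) + 3 + min st.2.2 (PySem.Str.len p.2))
          else st.1,
         st.2.1 - (PySem.Str.len p.2 + 1), st.2.2 - (PySem.Str.len p.2 + 1)))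
      (PySem.Dict.empty, position.1, position.2)
  final.1.items

-- ===== PORT B =====
def get_highlighted_text_py_alt (lines : List String) (position : Int × Int) : List (Int × Int × Int) :=
  let start := position.1
  let stop := position.2
  let offsets :=
    (lines.foldl
      (fun (p : List Int × Int) line => (p.1 ++ [p.2], p.2 + (PySem.Str.len line + 1)))
      ([], 0)).1
  (PySem.List.enumerate (lines.zip offsets)).filterMap
    (fun q =>
      if q.2.2 < stop ∧ q.2.2 + PySem.Str.len q.2.1 > start then
        some (q.1, PySem.Str.len (PySem.Int.toStr q.1) + 3 + start - q.2.2,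
                   PySem.Str.len (PySem.Int.toStr q.1) + 3 + min (stop - q.2.2) (PySem.Str.len q.2.1))
      else none)

-- ===== PRECONDITION & SPEC =====
def Spec_get_highlighted_text_py (lines : List String) (position : Int × Int) (out : List (Int × Int × Int)) : Prop := out = get_highlighted_text_py_alt lines position
instance (lines : List String) (position : Int × Int) (out : List (Int × Int × Int)) : Decidable (Spec_get_highlighted_text_py lines position out) := by unfold Spec_get_highlighted_text_py; infer_instance

-- ===== CLAIM (what is proved, stated in full; the proofs are below) =====
def Claim_equal_get_highlighted_text_py : Prop := ∀ (lines : List String) (position : Int × Int), Dom_get_highlighted_text_py lines position → Spec_get_highlighted_text_py lines position (get_highlighted_text_py lines position)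

-- ===== LEMMAS AND PROOFS =====

-- Common recursive description of the selected lines: index k, remaining start/end.
def pvRec (lines : List String) (k rs re : Int) : List (Int × Int × Int) :=
  match lines with
  | [] => []
  | l :: ls =>
    (if PySem.Str.len l > rs ∧ re > 0 then
       [(k, PySem.Str.len (PySem.Int.toStr k) + 3 + rs,
            PySem.Str.len (PySem.Int.toStr k) + 3 + min re (PySem.Str.len l))]
     else []) ++ pvRec ls (k + 1) (rs - (PySem.Str.len l + 1)) (re - (PySem.Str.len l + 1))

-- The prefix offsets B's first loop builds, described recursively.
def pvOffs (lines : List String) (off : Int) : List Int :=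
  match lines with
  | [] => []
  | l :: ls => off :: pvOffs ls (off + (PySem.Str.len l + 1))

lemma pvA_aux (lines : List String) : ∀ (k rs re : Int) (d : PySem.Dict Int (Int × Int)),
    d.keys.Nodup → (∀ j ∈ d.keys, j < k) →
    ((PySem.List.enumerate lines k).foldl
      (fun (st : PySem.Dict Int (Int × Int) × Int × Int) (p : Int × String) =>
        (if PySem.Str.len p.2 > st.2.1 ∧ st.2.2 > 0 then
            st.1.insert p.1
              (PySem.Str.len (PySem.Int.toStr p.1) + 3 + st.2.1,
               PySem.Str.len (PySem.Int.toStr p.1) + 3 + min st.2.2 (PySem.Str.len p.2))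
          else st.1,
         st.2.1 - (PySem.Str.len p.2 + 1), st.2.2 - (PySem.Str.len p.2 + 1)))
      (d, rs, re)).1.items = d.items ++ pvRec lines k rs re := by
  induction lines with
  | nil => intro k rs re d _ _; simp [PySem.List.enumerate_nil, pvRec]
  | cons l ls ih =>
    intro k rs re d hnd hlt
    rw [PySem.List.enumerate_cons, List.foldl_cons]
    dsimp only
    by_cases h : PySem.Str.len l > rs ∧ re > 0
    · have hc : d.contains k = false := by
        rw [PySem.Dict.contains_eq_decide_mem_keys]
        simp only [decide_eq_false_iff_not]
        intro hk; exact absurd (hlt k hk) (by omega)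
      rw [if_pos h]
      rw [ih (k + 1) (rs - (PySem.Str.len l + 1)) (re - (PySem.Str.len l + 1)) _
          (PySem.Dict.nodup_keys_insert _ _ _ hnd)
          (fun j hj => by
            rcases (PySem.Dict.mem_keys_insert _ _ _ _).mp hj with h1 | h1
            · omega
            · have := hlt j h1; omega)]
      rw [PySem.Dict.items_insert_of_not_contains _ _ hc]
      rw [pvRec, if_pos h]
      simp
    · rw [if_neg h]
      rw [ih (k + 1) (rs - (PySem.Str.len l + 1)) (re - (PySem.Str.len l + 1)) d hnd
          (fun j hj => by have := hlt j hj; omega)]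
      rw [pvRec, if_neg h]
      simp

lemma pvB_offs (lines : List String) : ∀ (acc : List Int) (off : Int),
    (lines.foldl
      (fun (p : List Int × Int) line => (p.1 ++ [p.2], p.2 + (PySem.Str.len line + 1)))
      (acc, off)).1 = acc ++ pvOffs lines off := by
  induction lines with
  | nil => intro acc off; simp [pvOffs]
  | cons l ls ih =>
    intro acc off
    rw [List.foldl_cons, ih]
    simp [pvOffs]

lemma pvB_aux (lines : List String) : ∀ (k off start stop : Int),
    ((PySem.List.enumerate (lines.zip (pvOffs lines off)) k).filterMap
      (fun q =>
        if q.2.2 < stop ∧ q.2.2 + PySem.Str.len q.2.1 > start then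
          some (q.1, PySem.Str.len (PySem.Int.toStr q.1) + 3 + start - q.2.2,
                     PySem.Str.len (PySem.Int.toStr q.1) + 3 + min (stop - q.2.2) (PySem.Str.len q.2.1))
        else none)) = pvRec lines k (start - off) (stop - off) := by
  induction lines with
  | nil => intro k off start stop; simp [pvOffs, pvRec]
  | cons l ls ih =>
    intro k off start stop
    rw [pvOffs, List.zip_cons_cons, PySem.List.enumerate_cons, List.filterMap_cons]
    dsimp only
    by_cases h : off < stop ∧ off + PySem.Str.len l > start
    · rw [if_pos h, ih (k + 1) (off + (PySem.Str.len l + 1)) start stop]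
      rw [pvRec, if_pos (by omega)]
      simp only [List.cons_append, List.nil_append]
      congr 1
      · rw [Prod.mk.injEq, Prod.mk.injEq]
        refine ⟨rfl, by omega, by omega⟩
      · congr 1 <;> omega
    · rw [if_neg h, ih (k + 1) (off + (PySem.Str.len l + 1)) start stop]
      rw [pvRec, if_neg (by omega)]
      simp only [List.nil_append]
      congr 1 <;> omega

-- ===== VERDICT (by name: the statement is the Claim_ definition above) =====
theorem get_highlighted_text_py_spec : Claim_equal_get_highlighted_text_py := by
  intro lines position _
  unfold Spec_get_highlighted_text_py get_highlighted_text_py get_highlighted_text_py_alt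
  rw [pvA_aux lines 0 position.1 position.2 PySem.Dict.empty (by simp) (by simp)]
  rw [pvB_offs lines [] 0]
  simp only [List.nil_append]
  rw [pvB_aux lines 0 0 position.1 position.2]
  simp only [sub_zero]
  rfl
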